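-- pv_equiv track=rewrite | github.com/jcdeacon/NLP | Assignment1/nb+svm/main.py | get_sign_values
-- ===== SOURCE A (Python) =====
-- def get_sign_values(reviews, system1, system2, classifications, polarities):
--     sign_values = {'plus': 0, 'minus': 0, 'null': 0}
--
--     for review in reviews:
--         system1_correct = classifications[review][system1] == polarities[review]
--         system2_correct = classifications[review][system2] == polarities[review]
--
--         if system1_correct == system2_correct:
--             sign_values['null'] += 1
--         elif system1_correct:
--             sign_values['plus'] += 1
--         elif system2_correct:
--             sign_values['minus'] += 1
--
--     return sign_values
-- ===== SOURCE B (Python) =====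
-- def get_sign_values(reviews, system1, system2, classifications, polarities):
--     # Tabulate (system1_correct, system2_correct) outcomes in one pass,
--     # then map the four states to the three sign-test categories.
--     outcomes = [(classifications[r][system1] == polarities[r],
--                  classifications[r][system2] == polarities[r]) for r in reviews]
--     return {'plus': outcomes.count((True, False)),
--             'minus': outcomes.count((False, True)),
--             'null': outcomes.count((True, True)) + outcomes.count((False, False))}
-- ===== Notes on version B (the rewrite author's own statement) =====
-- stated objective: simpler
-- what changed: Replaces the per-review if/elif branching on a mutable counter dict by a single comprehension tabulating (system1_correct, system2_correct) outcome pairs, with the three categories computed afterwards as counts of those pairs.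
import Mathlib
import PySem

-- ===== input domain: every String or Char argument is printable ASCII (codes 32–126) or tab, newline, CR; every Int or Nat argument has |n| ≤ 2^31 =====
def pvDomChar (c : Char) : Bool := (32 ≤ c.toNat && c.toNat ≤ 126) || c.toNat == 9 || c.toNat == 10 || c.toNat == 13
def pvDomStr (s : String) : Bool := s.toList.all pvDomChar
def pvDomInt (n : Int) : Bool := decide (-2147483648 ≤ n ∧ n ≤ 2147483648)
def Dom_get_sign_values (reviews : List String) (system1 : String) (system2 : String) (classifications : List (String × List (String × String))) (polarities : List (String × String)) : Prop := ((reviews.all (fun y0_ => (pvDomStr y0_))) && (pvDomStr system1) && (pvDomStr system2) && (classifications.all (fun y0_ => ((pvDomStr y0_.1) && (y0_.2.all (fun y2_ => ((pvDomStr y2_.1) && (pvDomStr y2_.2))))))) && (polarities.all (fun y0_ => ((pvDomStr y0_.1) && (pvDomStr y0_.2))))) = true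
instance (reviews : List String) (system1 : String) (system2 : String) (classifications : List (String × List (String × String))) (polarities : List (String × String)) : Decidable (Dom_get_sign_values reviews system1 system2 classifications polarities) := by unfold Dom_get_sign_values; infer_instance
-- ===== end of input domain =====

-- B replaces A's per-review if/elif branching on a mutable counter dict by one
-- comprehension of (system1_correct, system2_correct) pairs plus three counts (simpler).

-- ===== PORT A =====
def get_sign_values (reviews : List String) (system1 : String) (system2 : String) (classifications : List (String × List (String × String))) (polarities : List (String × String)) : List (String × Int) :=
  let init : PySem.Dict String Int := PySem.Dict.mk [("plus", 0), ("minus", 0), ("null", 0)]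
  (reviews.foldl (fun sign_values review =>
      let system1_correct : Bool :=
        (PySem.Dict.mk ((PySem.Dict.mk classifications).getD review [])).get? system1
          == (PySem.Dict.mk polarities).get? review
      let system2_correct : Bool :=
        (PySem.Dict.mk ((PySem.Dict.mk classifications).getD review [])).get? system2
          == (PySem.Dict.mk polarities).get? review
      if system1_correct == system2_correct then sign_values.modify "null" 0 (· + 1)
      else if system1_correct then sign_values.modify "plus" 0 (· + 1)
      else if system2_correct then sign_values.modify "minus" 0 (· + 1)
      else sign_values) init).items

-- ===== PORT B =====
def get_sign_values_alt (reviews : List String) (system1 : String) (system2 : String) (classifications : List (String × List (String × String))) (polarities : List (String × String)) : List (String × Int) :=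
  let outcomes : List (Bool × Bool) := reviews.map (fun r =>
    ((PySem.Dict.mk ((PySem.Dict.mk classifications).getD r [])).get? system1
        == (PySem.Dict.mk polarities).get? r,
     (PySem.Dict.mk ((PySem.Dict.mk classifications).getD r [])).get? system2
        == (PySem.Dict.mk polarities).get? r))
  [("plus", (outcomes.count (true, false) : Int)),
   ("minus", (outcomes.count (false, true) : Int)),
   ("null", (outcomes.count (true, true) : Int) + (outcomes.count (false, false) : Int))]

-- ===== PRECONDITION & SPEC =====
-- Pre_ excludes exactly the inputs where the Python raises KeyError: some review
-- missing from classifications or polarities, or system1/system2 missing from its row.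
def Pre_get_sign_values (reviews : List String) (system1 : String) (system2 : String) (classifications : List (String × List (String × String))) (polarities : List (String × String)) : Prop :=
  (reviews.all (fun r =>
      (PySem.Dict.mk classifications).contains r
      && (PySem.Dict.mk ((PySem.Dict.mk classifications).getD r [])).contains system1
      && (PySem.Dict.mk ((PySem.Dict.mk classifications).getD r [])).contains system2
      && (PySem.Dict.mk polarities).contains r)) = true
instance (reviews : List String) (system1 : String) (system2 : String) (classifications : List (String × List (String × String))) (polarities : List (String × String)) : Decidable (Pre_get_sign_values reviews system1 system2 classifications polarities) := by unfold Pre_get_sign_values; infer_instance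

def pvWitness_get_sign_values : List String × String × String × (List (String × List (String × String))) × (List (String × String)) :=
  (["r0"], "s1", "s2", [("r0", [("s1", "POS"), ("s2", "NEG")])], [("r0", "POS")])

def Spec_get_sign_values (reviews : List String) (system1 : String) (system2 : String) (classifications : List (String × List (String × String))) (polarities : List (String × String)) (out : List (String × Int)) : Prop := out = get_sign_values_alt reviews system1 system2 classifications polarities
instance (reviews : List String) (system1 : String) (system2 : String) (classifications : List (String × List (String × String))) (polarities : List (String × String)) (out : List (String × Int)) : Decidable (Spec_get_sign_values reviews system1 system2 classifications polarities out) := by unfold Spec_get_sign_values; infer_instance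

-- ===== CLAIM (what is proved, stated in full; the proofs are below) =====
def Claim_equal_get_sign_values : Prop := ∀ (reviews : List String) (system1 : String) (system2 : String) (classifications : List (String × List (String × String))) (polarities : List (String × String)), Dom_get_sign_values reviews system1 system2 classifications polarities → Pre_get_sign_values reviews system1 system2 classifications polarities → Spec_get_sign_values reviews system1 system2 classifications polarities (get_sign_values reviews system1 system2 classifications polarities)

-- ===== LEMMAS AND PROOFS =====

-- One increment of A's three-key counter dict, per key.
lemma pv_mod_null (a b c : Int) :
    (PySem.Dict.mk [("plus", a), ("minus", b), ("null", c)]).modify "null" 0 (· + 1)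
      = PySem.Dict.mk [("plus", a), ("minus", b), ("null", c + 1)] := by
  simp [PySem.Dict.modify, PySem.Dict.insert, PySem.Dict.contains, PySem.Dict.getD,
    PySem.Dict.get?]

lemma pv_mod_plus (a b c : Int) :
    (PySem.Dict.mk [("plus", a), ("minus", b), ("null", c)]).modify "plus" 0 (· + 1)
      = PySem.Dict.mk [("plus", a + 1), ("minus", b), ("null", c)] := by
  simp [PySem.Dict.modify, PySem.Dict.insert, PySem.Dict.contains, PySem.Dict.getD,
    PySem.Dict.get?]

lemma pv_mod_minus (a b c : Int) :
    (PySem.Dict.mk [("plus", a), ("minus", b), ("null", c)]).modify "minus" 0 (· + 1)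
      = PySem.Dict.mk [("plus", a), ("minus", b + 1), ("null", c)] := by
  simp [PySem.Dict.modify, PySem.Dict.insert, PySem.Dict.contains, PySem.Dict.getD,
    PySem.Dict.get?]

-- A's accumulator fold, characterised for ANY per-review outcome functions q1 q2.
lemma pv_fold_counts (q1 q2 : String → Bool) (rs : List String) (a b c : Int) :
    rs.foldl (fun sv r =>
        if q1 r == q2 r then sv.modify "null" 0 (· + 1)
        else if q1 r then sv.modify "plus" 0 (· + 1)
        else if q2 r then sv.modify "minus" 0 (· + 1)
        else sv)
      (PySem.Dict.mk [("plus", a), ("minus", b), ("null", c)])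
    = PySem.Dict.mk
        [("plus", a + ((rs.map (fun r => (q1 r, q2 r))).count (true, false) : Int)),
         ("minus", b + ((rs.map (fun r => (q1 r, q2 r))).count (false, true) : Int)),
         ("null", c + ((rs.map (fun r => (q1 r, q2 r))).count (true, true) : Int)
                    + ((rs.map (fun r => (q1 r, q2 r))).count (false, false) : Int))] := by
  induction rs generalizing a b c with
  | nil => simp
  | cons r rs ih =>
    cases h1 : q1 r <;> cases h2 : q2 r <;>
      (simp only [List.foldl_cons, h1, h2,
         show ((false : Bool) == true) = false from rfl,
         show ((true : Bool) == false) = false from rfl,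
         show ((true : Bool) == true) = true from rfl,
         show ((false : Bool) == false) = true from rfl,
         Bool.false_eq_true, if_true, if_false]
       first
       | rw [pv_mod_null, ih]
       | rw [pv_mod_plus, ih]
       | rw [pv_mod_minus, ih]
       simp [h1, h2]
       ring_nf)

-- ===== VERDICT (by name: the statement is the Claim_ definition above) =====
theorem get_sign_values_spec : Claim_equal_get_sign_values := by
  intro reviews system1 system2 classifications polarities _ _
  unfold Spec_get_sign_values get_sign_values get_sign_values_alt
  simp only [pv_fold_counts
      (fun r => (PySem.Dict.mk ((PySem.Dict.mk classifications).getD r [])).get? system1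
          == (PySem.Dict.mk polarities).get? r)
      (fun r => (PySem.Dict.mk ((PySem.Dict.mk classifications).getD r [])).get? system2
          == (PySem.Dict.mk polarities).get? r)
      reviews 0 0 0]
  simp
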